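-- pv_equiv track=rewrite | github.com/marcioflambo/schoenstatt | backend/app/songs.py | _normalize_lyrics_text
-- ===== SOURCE A (Python) =====
-- def _normalize_lyrics_text(text: str) -> str:
--     normalized_breaks = text.replace('\r\n', '\n').replace('\r', '\n')
--     lines = [line.rstrip() for line in normalized_breaks.split('\n')]
--     normalized: list[str] = []
--     blank_streak = 0
--
--     for line in lines:
--         if not line.strip():
--             blank_streak += 1
--             if blank_streak <= 2:
--                 normalized.append('')
--             continue
--
--         blank_streak = 0
--         normalized.append(line)
--
--     return '\n'.join(normalized).strip()
-- ===== SOURCE B (Python) =====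
-- import re
--
--
-- def _normalize_lyrics_text(text: str) -> str:
--     lines = (line.rstrip() for line in
--              text.replace('\r\n', '\n').replace('\r', '\n').split('\n'))
--     return re.sub(r'\n{4,}', '\n\n\n', '\n'.join(lines)).strip()
-- ===== Notes on version B (the rewrite author's own statement) =====
-- stated objective: idiomatic
-- what changed: Replaces the explicit blank_streak state machine over lines with a declarative regex collapse: rstripped lines are joined once and any run of 4+ newlines is capped to 3 by re.sub, then stripped.
import Mathlib
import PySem

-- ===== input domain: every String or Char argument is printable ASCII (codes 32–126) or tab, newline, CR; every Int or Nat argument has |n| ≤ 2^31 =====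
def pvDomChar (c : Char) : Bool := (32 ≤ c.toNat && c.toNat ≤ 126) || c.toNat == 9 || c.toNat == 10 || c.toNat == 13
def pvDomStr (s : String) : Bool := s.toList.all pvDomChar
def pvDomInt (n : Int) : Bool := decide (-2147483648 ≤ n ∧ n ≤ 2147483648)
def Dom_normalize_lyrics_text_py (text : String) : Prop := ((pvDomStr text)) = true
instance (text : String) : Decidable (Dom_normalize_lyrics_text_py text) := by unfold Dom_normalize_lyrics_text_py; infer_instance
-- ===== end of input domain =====

-- B replaces A's explicit blank_streak state machine over lines by a declarative collapse:
-- join the rstripped lines once and cap every run of 4+ newlines to 3 (re.sub), then strip.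


-- ===== PORT A =====
-- the for-loop over lines, with its two pieces of state (normalized, blank_streak)
def pvALoop : List (List Char) → List (List Char) → Nat → List (List Char)
  | [], normalized, _ => normalized
  | line :: rest, normalized, blank_streak =>
    if (PySem.Chars.strip line).isEmpty then
      let bs := blank_streak + 1
      pvALoop rest (if bs ≤ 2 then normalized ++ [[]] else normalized) bs
    else
      pvALoop rest (normalized ++ [line]) 0

def normalize_lyrics_text_py (text : String) : String :=
  let normalized_breaks :=
    PySem.Chars.replace (PySem.Chars.replace text.toList ['\r', '\n'] ['\n']) ['\r'] ['\n']
  let lines := (PySem.Chars.splitOn normalized_breaks ['\n']).map PySem.Chars.rstrip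
  String.ofList (PySem.Chars.strip (PySem.Chars.join ['\n'] (pvALoop lines [] 0)))

-- ===== PORT B =====
-- hand port of re.sub(r'\n{4,}', '\n\n\n', s) for this fixed pattern: keep at most the
-- first 3 newlines of every newline run (exact: the pattern only matches newline runs)
def pvCapNl : Nat → List Char → List Char
  | _, [] => []
  | run, c :: rest =>
    if c = '\n' then
      if run < 3 then '\n' :: pvCapNl (run + 1) rest else pvCapNl (run + 1) rest
    else c :: pvCapNl 0 rest

def normalize_lyrics_text_py_alt (text : String) : String :=
  let lines :=
    (PySem.Chars.splitOn
      (PySem.Chars.replace (PySem.Chars.replace text.toList ['\r', '\n'] ['\n']) ['\r'] ['\n'])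
      ['\n']).map PySem.Chars.rstrip
  String.ofList (PySem.Chars.strip (pvCapNl 0 (PySem.Chars.join ['\n'] lines)))

-- ===== PRECONDITION & SPEC =====
def Spec_normalize_lyrics_text_py (text : String) (out : String) : Prop := out = normalize_lyrics_text_py_alt text
instance (text : String) (out : String) : Decidable (Spec_normalize_lyrics_text_py text out) := by unfold Spec_normalize_lyrics_text_py; infer_instance

-- ===== CLAIM (what is proved, stated in full; the proofs are below) =====
def Claim_equal_normalize_lyrics_text_py : Prop := ∀ (text : String), Dom_normalize_lyrics_text_py text → Spec_normalize_lyrics_text_py text (normalize_lyrics_text_py text)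

-- ===== LEMMAS AND PROOFS =====

-- abbreviation used only by the proofs
def pvJn (L : List (List Char)) : List Char := PySem.Chars.join ['\n'] L

-- A's loop, rephrased without the accumulator (blank line = [])
def pvMA : Nat → List (List Char) → List (List Char)
  | _, [] => []
  | k, l :: ls =>
    if l = [] then
      if k + 1 ≤ 2 then [] :: pvMA (k + 1) ls else pvMA (k + 1) ls
    else l :: pvMA 0 ls


-- ---- proved lemma bodies ----

lemma pv_go_no_nl : ∀ (fuel : Nat) (l cur : List Char) (acc : List (List Char)),
    '\n' ∉ cur → (∀ p ∈ acc, '\n' ∉ p) → l.length ≤ fuel →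
    ∀ p ∈ PySem.Chars.splitOn.go ['\n'] fuel l cur acc, '\n' ∉ p := by
  intro fuel
  induction fuel with
  | zero =>
    intro l cur acc hcur hacc hlen p hp
    have hl : l = [] := List.eq_nil_of_length_eq_zero (Nat.le_zero.mp hlen)
    subst hl
    simp only [PySem.Chars.splitOn.go] at hp
    rw [List.mem_reverse] at hp
    rcases List.mem_cons.mp hp with h | h
    · subst h; simpa using hcur
    · exact hacc p h
  | succ f ih =>
    intro l cur acc hcur hacc hlen p hp
    cases l with
    | nil =>
      simp only [PySem.Chars.splitOn.go] at hp
      rw [List.mem_reverse] at hp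
      rcases List.mem_cons.mp hp with h | h
      · subst h; simpa using hcur
      · exact hacc p h
    | cons c rest =>
      simp only [PySem.Chars.splitOn.go] at hp
      by_cases hc : c = '\n'
      · rw [if_pos (by simp [hc, List.isPrefixOf])] at hp
        refine ih _ _ _ (by simp) ?_ ?_ p hp
        · intro q hq
          rcases List.mem_cons.mp hq with h | h
          · subst h; simpa using hcur
          · exact hacc q h
        · simp only [List.length_cons] at hlen
          simp [List.length_drop]
          omega
      · rw [if_neg (by simp [List.isPrefixOf]; intro h; exact absurd h.symm hc)] at hp
        refine ih _ _ _ ?_ hacc (by simpa using Nat.le_of_succ_le_succ hlen) p hp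
        intro h
        rcases List.mem_cons.mp h with h1 | h1
        · exact hc h1.symm
        · exact hcur h1

lemma pv_splitOn_no_nl (s : List Char) :
    ∀ p ∈ PySem.Chars.splitOn s ['\n'], '\n' ∉ p :=
  pv_go_no_nl (s.length + 1) s [] [] (by simp) (by simp) (by omega)

lemma pv_ws_nl : PySem.Chars.isspace '\n' = true := by decide

lemma pv_dropWhile_rep (n : Nat) (t : List Char) :
    List.dropWhile PySem.Chars.isspace (List.replicate n '\n' ++ t)
      = List.dropWhile PySem.Chars.isspace t := by
  induction n with
  | zero => simp
  | succ m ih => rw [List.replicate_succ, List.cons_append, List.dropWhile_cons_of_pos pv_ws_nl, ih]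

lemma pv_rstrip_append_ws (s : List Char) (q : Nat) :
    PySem.Chars.rstrip (s ++ List.replicate q '\n') = PySem.Chars.rstrip s := by
  simp only [PySem.Chars.rstrip, List.reverse_append, List.reverse_replicate]
  rw [pv_dropWhile_rep]

lemma pv_lstrip_rep_append (p : Nat) (s : List Char) :
    PySem.Chars.lstrip (List.replicate p '\n' ++ s) = PySem.Chars.lstrip s := by
  simp only [PySem.Chars.lstrip]
  rw [pv_dropWhile_rep]

lemma pv_strip_ws (n : Nat) : PySem.Chars.strip (List.replicate n '\n') = [] := by
  have : PySem.Chars.lstrip (List.replicate n '\n') = [] := by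
    have := pv_lstrip_rep_append n []
    simpa [PySem.Chars.lstrip] using this
  simp [PySem.Chars.strip, this, PySem.Chars.rstrip]

lemma pv_strip_sandwich (p q : Nat) (s : List Char) :
    PySem.Chars.strip (List.replicate p '\n' ++ s ++ List.replicate q '\n')
      = PySem.Chars.strip s := by
  rw [PySem.Chars.strip, List.append_assoc, pv_lstrip_rep_append]
  by_cases hs : PySem.Chars.lstrip s = []
  · have hall : ∀ x ∈ s, PySem.Chars.isspace x = true := by
      simpa [PySem.Chars.lstrip, List.dropWhile_eq_nil_iff] using hs
    have h2 : PySem.Chars.lstrip (s ++ List.replicate q '\n') = [] := by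
      simp only [PySem.Chars.lstrip, List.dropWhile_eq_nil_iff]
      intro x hx
      rcases List.mem_append.mp hx with h | h
      · exact hall x h
      · rw [List.eq_of_mem_replicate h]; exact pv_ws_nl
    rw [PySem.Chars.strip, hs, h2]
  · have h2 : PySem.Chars.lstrip (s ++ List.replicate q '\n')
        = PySem.Chars.lstrip s ++ List.replicate q '\n' := by
      simp only [PySem.Chars.lstrip, List.dropWhile_append]
      rw [if_neg (by simpa [PySem.Chars.lstrip, List.isEmpty_iff] using hs)]
    rw [h2, pv_rstrip_append_ws, PySem.Chars.strip]

lemma pv_mem_rstrip {a : Char} {l : List Char} (h : a ∈ PySem.Chars.rstrip l) : a ∈ l := by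
  simp only [PySem.Chars.rstrip, List.mem_reverse] at h
  have := (List.dropWhile_sublist (l := l.reverse) (p := PySem.Chars.isspace)).mem h
  simpa using this

lemma pv_rstrip_idem (l : List Char) :
    PySem.Chars.rstrip (PySem.Chars.rstrip l) = PySem.Chars.rstrip l := by
  simp only [PySem.Chars.rstrip, List.reverse_reverse]
  congr 1
  rw [List.dropWhile_eq_self_iff]
  intro hl hp
  have := List.head?_dropWhile_not PySem.Chars.isspace l.reverse
  rw [List.head?_eq_getElem?] at this
  rw [List.getElem?_eq_getElem hl] at this
  simp at this
  simp [this] at hp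

lemma pv_blank_iff {l : List Char} (h : PySem.Chars.rstrip l = l) :
    (PySem.Chars.strip l = []) ↔ l = [] := by
  constructor
  · intro hs
    by_contra hne
    -- l ends in a non-whitespace char
    have hrev : l.reverse ≠ [] := by simpa using hne
    obtain ⟨d, r, hdr⟩ := List.exists_cons_of_ne_nil hrev
    have hd : PySem.Chars.isspace d = false := by
      have hds : List.dropWhile PySem.Chars.isspace l.reverse = l.reverse := by
        have : (List.dropWhile PySem.Chars.isspace l.reverse).reverse = l := h
        calc List.dropWhile PySem.Chars.isspace l.reverse
            = (List.dropWhile PySem.Chars.isspace l.reverse).reverse.reverse := by simp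
          _ = l.reverse := by rw [this]
      rw [hdr] at hds
      by_contra hb
      rw [List.dropWhile_cons_of_pos (by simpa using hb)] at hds
      have hle := (List.dropWhile_sublist (p := PySem.Chars.isspace) (l := r)).length_le
      have := congrArg List.length hds
      simp at this
      omega
    -- d ∈ lstrip l
    have hdl : d ∈ PySem.Chars.lstrip l := by
      have hdmem : d ∈ l := by
        have : d ∈ l.reverse := by rw [hdr]; simp
        simpa using this
      by_contra hno
      have : ∀ x ∈ l, x ∈ PySem.Chars.lstrip l ∨ PySem.Chars.isspace x = true := by
        intro x hx
        rw [← List.takeWhile_append_dropWhile (p := PySem.Chars.isspace) (l := l)] at hx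
        rcases List.mem_append.mp hx with hx1 | hx2
        · exact Or.inr (List.mem_takeWhile_imp hx1)
        · exact Or.inl hx2
      rcases this d hdmem with h1 | h2
      · exact hno h1
      · rw [hd] at h2; exact absurd h2 (by simp)
    -- so lstrip l nonempty and its dropWhile-reversed is nonempty
    have : PySem.Chars.strip l ≠ [] := by
      simp only [PySem.Chars.strip, PySem.Chars.rstrip]
      intro hc
      have : List.dropWhile PySem.Chars.isspace (PySem.Chars.lstrip l).reverse = [] := by
        simpa using hc
      rw [List.dropWhile_eq_nil_iff] at this
      have := this d (by simpa using hdl)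
      rw [hd] at this; exact absurd this (by simp)
    exact this hs
  · intro h; subst h; rfl
lemma pv_jn_nil : pvJn [] = [] := by simp [pvJn, PySem.Chars.join, List.intercalate]
lemma pv_jn_single (x : List Char) : pvJn [x] = x := by simp [pvJn, PySem.Chars.join, List.intercalate]
lemma pv_jn_cons₂ (x y : List Char) (t : List (List Char)) :
    pvJn (x :: y :: t) = x ++ '\n' :: pvJn (y :: t) := by
  simp [pvJn, PySem.Chars.join, List.intercalate, List.intersperse]

lemma pv_jn_cons (x : List Char) (t : List (List Char)) (ht : t ≠ []) :
    pvJn (x :: t) = x ++ '\n' :: pvJn t := by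
  cases t with
  | nil => exact absurd rfl ht
  | cons y t' => exact pv_jn_cons₂ x y t'

lemma pv_jn_blanks (j : Nat) : pvJn (List.replicate j []) = List.replicate (j - 1) '\n' := by
  induction j with
  | zero => simp [pv_jn_nil]
  | succ n ih =>
    cases n with
    | zero => simp [pv_jn_single]
    | succ m =>
      rw [List.replicate_succ, pv_jn_cons _ _ (by simp), ih]
      simp [List.replicate_succ]

lemma pv_jn_blanks_append (a : Nat) (X : List (List Char)) (hX : X ≠ []) :
    pvJn (List.replicate a [] ++ X) = List.replicate a '\n' ++ pvJn X := by
  induction a with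
  | zero => simp
  | succ n ih =>
    rw [List.replicate_succ, List.cons_append, pv_jn_cons _ _ (by simp [hX]), ih]
    simp [List.replicate_succ]

lemma pv_jn_append_blanks (X : List (List Char)) (c : Nat) (hX : X ≠ []) :
    pvJn (X ++ List.replicate c []) = pvJn X ++ List.replicate c '\n' := by
  induction X with
  | nil => exact absurd rfl hX
  | cons x t ih =>
    cases t with
    | nil =>
      cases c with
      | zero => simp
      | succ m =>
        rw [List.singleton_append, List.replicate_succ, pv_jn_cons _ _ (by simp),
          show ([] :: List.replicate m ([] : List Char)) = List.replicate (m+1) [] from rfl,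
          pv_jn_blanks, pv_jn_single]
        simp [List.replicate_succ]
    | cons y t' =>
      rw [List.cons_append, pv_jn_cons _ _ (by simp), pv_jn_cons _ _ (by simp), ih (by simp)]
      simp

lemma pv_jn_head (h : List Char) (t : List (List Char)) (hh : h ≠ []) (hnl : '\n' ∉ h) :
    ∃ c r, pvJn (h :: t) = c :: r ∧ c ≠ '\n' := by
  cases h with
  | nil => exact absurd rfl hh
  | cons c h' =>
    have hc : c ≠ '\n' := fun e => hnl (by simp [e])
    cases t with
    | nil => exact ⟨c, h', by simp [pv_jn_single], hc⟩
    | cons y t' => exact ⟨c, h' ++ '\n' :: pvJn (y :: t'), by simp [pv_jn_cons₂], hc⟩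

lemma pv_jn_getLast : ∀ (K : List (List Char)), K ≠ [] → K.getLast? ≠ some [] →
    (∀ l ∈ K, '\n' ∉ l) →
    ∃ d, (pvJn K).getLast? = some d ∧ d ≠ '\n' := by
  intro K
  induction K with
  | nil => intro h; exact absurd rfl h
  | cons x t ih =>
    intro _ hlast hmem
    cases t with
    | nil =>
      have hx : x ≠ [] := by simpa using hlast
      refine ⟨x.getLast hx, ?_, fun e => hmem x (by simp) (e ▸ List.getLast_mem hx)⟩
      simp [pv_jn_single, List.getLast?_eq_some_getLast hx]
    | cons y t' =>
      obtain ⟨d, hd, hdn⟩ := ih (by simp)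
        (by simpa [List.getLast?_cons_cons] using hlast)
        (fun l hl => hmem l (by simp [hl]))
      refine ⟨d, ?_, hdn⟩
      have hne : pvJn (y :: t') ≠ [] := fun e => by simp [e] at hd
      rw [pv_jn_cons₂, List.getLast?_append_of_ne_nil _ (by simp),
        show ('\n' :: pvJn (y :: t')) = ['\n'] ++ pvJn (y :: t') from rfl,
        List.getLast?_append_of_ne_nil _ hne, hd]

lemma pv_mA_blanks : ∀ (a k : Nat) (rest : List (List Char)),
    pvMA k (List.replicate a [] ++ rest)
      = List.replicate (min (k + a) 2 - min k 2) [] ++ pvMA (k + a) rest := by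
  intro a
  induction a with
  | zero => simp
  | succ n ih =>
    intro k rest
    rw [List.replicate_succ, List.cons_append]
    show pvMA k ([] :: (List.replicate n [] ++ rest)) = _
    by_cases hk : k + 1 ≤ 2
    · simp only [pvMA, if_pos rfl, if_pos hk, ih (k+1) rest]
      have h1 : min (k + (n+1)) 2 - min k 2 = (min (k + 1 + n) 2 - min (k+1) 2) + 1 := by omega
      rw [h1, List.replicate_succ]
      simp [show k + 1 + n = k + (n + 1) by omega]
    · simp only [pvMA, if_pos rfl, if_neg hk, ih (k+1) rest]
      have h1 : min (k + (n+1)) 2 - min k 2 = min (k + 1 + n) 2 - min (k+1) 2 := by omega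
      rw [h1]
      simp [show k + 1 + n = k + (n + 1) by omega]

lemma pv_mA_nonblank_cons (k : Nat) (l : List Char) (rest : List (List Char)) (hl : l ≠ []) :
    pvMA k (l :: rest) = l :: pvMA 0 rest := by
  simp [pvMA, hl]

lemma pv_mA_append_blanks : ∀ (K : List (List Char)) (k c : Nat), K ≠ [] →
    K.getLast? ≠ some [] →
    pvMA k (K ++ List.replicate c []) = pvMA k K ++ List.replicate (min c 2) [] := by
  intro K
  induction K with
  | nil => intro _ _ h; exact absurd rfl h
  | cons x t ih =>
    intro k c _ hlast
    cases t with
    | nil =>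
      have hx : x ≠ [] := by simpa using hlast
      rw [List.singleton_append, pv_mA_nonblank_cons _ _ _ hx,
        pv_mA_nonblank_cons _ _ _ hx]
      have := pv_mA_blanks c 0 []
      simp only [List.append_nil] at this
      simp [this, pvMA]
    | cons y t' =>
      have hlast' : (y :: t').getLast? ≠ some [] := by
        simpa [List.getLast?_cons_cons] using hlast
      have ihy := fun k => ih k c (by simp) hlast'
      by_cases hx : x = []
      · subst hx
        show pvMA k ([] :: ((y :: t') ++ _)) = _
        by_cases hk : k + 1 ≤ 2 <;>
          simp only [pvMA, if_pos rfl, if_pos, if_neg, hk, ihy (k+1)] <;> simp [pvMA, hk]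
      · rw [List.cons_append, pv_mA_nonblank_cons _ _ _ hx, pv_mA_nonblank_cons _ _ _ hx,
          ihy 0]
        simp

lemma pv_capNl_line : ∀ (l : List Char) (k : Nat) (rest : List Char),
    '\n' ∉ l → l ≠ [] → pvCapNl k (l ++ rest) = l ++ pvCapNl 0 rest := by
  intro l
  induction l with
  | nil => intro _ _ _ h; exact absurd rfl h
  | cons c l' ih =>
    intro k rest hnl _
    have hc : c ≠ '\n' := fun e => hnl (by simp [e])
    cases l' with
    | nil => simp [pvCapNl, hc]
    | cons d l'' =>
      rw [List.cons_append]
      show pvCapNl k (c :: (d :: l'' ++ rest)) = _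
      simp only [pvCapNl, if_neg hc]
      rw [ih 0 rest (fun h => hnl (by simp [h])) (by simp)]
      simp

lemma pv_capNl_ws : ∀ (n k : Nat) (rest : List Char),
    (rest = [] ∨ ∃ c r, rest = c :: r ∧ c ≠ '\n') →
    pvCapNl k (List.replicate n '\n' ++ rest)
      = List.replicate (min n (3 - k)) '\n' ++ pvCapNl 0 rest := by
  intro n
  induction n with
  | zero =>
    intro k rest hrest
    rcases hrest with h | ⟨c, r, h, hc⟩ <;> subst h
    · simp [pvCapNl]
    · simp [pvCapNl, hc]
  | succ m ih =>
    intro k rest hrest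
    rw [List.replicate_succ, List.cons_append]
    show pvCapNl k ('\n' :: (List.replicate m '\n' ++ rest)) = _
    by_cases hk : k < 3
    · simp only [pvCapNl, if_pos rfl, if_pos hk, ih (k+1) rest hrest]
      have h1 : min (m + 1) (3 - k) = min m (3 - (k + 1)) + 1 := by omega
      rw [h1, List.replicate_succ]
      simp
    · simp only [pvCapNl, if_pos rfl, if_neg hk, ih (k+1) rest hrest]
      have h1 : min (m + 1) (3 - k) = min m (3 - (k + 1)) := by omega
      rw [h1]
      simp

lemma pv_capNl_append : ∀ (u : List Char) (k : Nat) (v : List Char), u ≠ [] →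
    (∀ d, u.getLast? = some d → d ≠ '\n') →
    pvCapNl k (u ++ v) = pvCapNl k u ++ pvCapNl 0 v := by
  intro u
  induction u with
  | nil => intro _ _ h; exact absurd rfl h
  | cons c u' ih =>
    intro k v _ hlast
    cases u' with
    | nil =>
      have hc : c ≠ '\n' := hlast c (by simp)
      simp [pvCapNl, hc]
    | cons d u'' =>
      have hlast' : ∀ e, (d :: u'').getLast? = some e → e ≠ '\n' := by
        intro e he
        exact hlast e (by rw [List.getLast?_cons_cons] at *; exact he)
      rw [List.cons_append]
      show pvCapNl k (c :: (d :: u'' ++ v)) = _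
      by_cases hc : c = '\n'
      · subst hc
        by_cases hk : k < 3 <;>
          simp only [pvCapNl, if_pos rfl, hk, if_pos, if_neg, ih (k+1) v (by simp) hlast'] <;>
            simp [pvCapNl, hk]
      · simp only [pvCapNl, if_neg hc, ih 0 v (by simp) hlast']
        simp


lemma pv_loop_eq : ∀ (L : List (List Char)) (acc : List (List Char)) (k : Nat),
    (∀ l ∈ L, PySem.Chars.rstrip l = l) →
    pvALoop L acc k = acc ++ pvMA k L := by
  intro L
  induction L with
  | nil => intro acc k _; simp [pvALoop, pvMA]
  | cons l ls ih =>
    intro acc k hinv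
    have hbl : ((PySem.Chars.strip l).isEmpty = true) ↔ l = [] := by
      rw [List.isEmpty_iff]
      exact pv_blank_iff (hinv l (by simp))
    by_cases hl : l = []
    · subst hl
      show pvALoop _ _ _ = _
      simp only [pvALoop, if_pos (hbl.mpr rfl)]
      by_cases hk : k + 1 ≤ 2
      · rw [if_pos hk, ih _ _ (fun x hx => hinv x (by simp [hx]))]
        simp [pvMA, hk]
      · rw [if_neg hk, ih _ _ (fun x hx => hinv x (by simp [hx]))]
        simp [pvMA, hk]
    · show pvALoop _ _ _ = _
      rw [pvALoop, if_neg (by rw [hbl]; exact hl), ih _ _ (fun x hx => hinv x (by simp [hx]))]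
      simp [pvMA, hl]

-- ---- the core equality (no leading/trailing blank lines) ----
lemma pv_core_aux : ∀ (n : Nat) (K : List (List Char)), K.length ≤ n → (∀ l ∈ K, '\n' ∉ l) →
    K.head? ≠ some [] → K.getLast? ≠ some [] →
    pvJn (pvMA 0 K) = pvCapNl 0 (pvJn K) := by
  intro n
  induction n with
  | zero =>
    intro K hlen _ _ _
    have : K = [] := List.eq_nil_of_length_eq_zero (Nat.le_zero.mp hlen)
    subst this
    simp [pvMA, pvJn, PySem.Chars.join, List.intercalate, pvCapNl]
  | succ n ih =>
    intro K hlen hmem hhead hlast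
    cases K with
    | nil => simp [pvMA, pvJn, PySem.Chars.join, List.intercalate, pvCapNl]
    | cons l rest =>
      have hl : l ≠ [] := fun e => hhead (by simp [e])
      have hlnl : '\n' ∉ l := hmem l (by simp)
      -- decompose rest into leading blanks ++ rest'
      set rest' := rest.dropWhile List.isEmpty with hrest'
      set b := (rest.takeWhile List.isEmpty).length with hb
      have hdec : rest = List.replicate b [] ++ rest' := by
        conv_lhs => rw [← List.takeWhile_append_dropWhile (p := List.isEmpty) (l := rest)]
        congr 1
        rw [hb]
        exact List.eq_replicate_of_mem (fun x hx => by
          simpa [List.isEmpty_iff] using List.mem_takeWhile_imp hx)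
      have hheadfact := List.head?_dropWhile_not List.isEmpty rest
      rw [← hrest'] at hheadfact
      cases hres : rest' with
      | nil =>
        rw [hres] at hdec
        simp only [List.append_nil] at hdec
        cases hbz : b with
        | zero =>
          rw [hbz] at hdec; simp only [List.replicate_zero] at hdec
          subst hdec
          rw [pv_mA_nonblank_cons _ _ _ hl]
          show pvJn [l] = pvCapNl 0 (pvJn [l])
          rw [pv_jn_single, ← List.append_nil l, pv_capNl_line l 0 [] hlnl hl]
          simp [pvCapNl]
        | succ m =>
          exfalso
          apply hlast
          rw [hdec, hbz, List.replicate_succ', show (l :: (List.replicate m ([] : List Char) ++ [[]])) = (l :: List.replicate m []) ++ [[]] by simp,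
            List.getLast?_concat]
      | cons h' t' =>
        have hh' : h' ≠ [] := by
          rw [hres] at hheadfact
          simp only [List.head?_cons] at hheadfact
          simpa [List.isEmpty_iff] using hheadfact
        have hrestne : rest ≠ [] := by
          rw [hdec, hres]; simp
        have hmemr : ∀ x ∈ rest', '\n' ∉ x := by
          intro x hx
          exact hmem x (by
            right
            rw [hdec]
            exact List.mem_append_right _ hx)
        have hlast' : (h' :: t').getLast? ≠ some [] := by
          intro e
          apply hlast
          rw [show (l :: rest).getLast? = rest.getLast? by
              cases rest with
              | nil => exact absurd rfl hrestne
              | cons a b => exact List.getLast?_cons_cons,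
            hdec, hres, List.getLast?_append_of_ne_nil _ (by simp)]
          exact e
        have hmemr' : ∀ x ∈ rest', '\n' ∉ x := hmemr
        -- IH applies to rest'
        have hlen' : (h' :: t').length ≤ n := by
          have h1 : rest'.length ≤ rest.length := (List.dropWhile_sublist _).length_le
          rw [hres] at h1
          simp only [List.length_cons] at hlen
          omega
        have hcore := ih (h' :: t') hlen' (by rw [← hres]; exact hmemr)
          (by
            intro e
            simp only [List.head?_cons, Option.some.injEq] at e
            exact hh' e) hlast'
        -- LHS
        have hMne : pvMA 0 (h' :: t') ≠ [] := by
          rw [pv_mA_nonblank_cons _ _ _ hh']; simp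
        have hMAeq : pvMA 0 (l :: rest)
            = l :: (List.replicate (min b 2) [] ++ pvMA 0 (h' :: t')) := by
          rw [pv_mA_nonblank_cons _ _ _ hl, hdec, hres]
          have hblanks := pv_mA_blanks b 0 (h' :: t')
          simp only [Nat.zero_add, Nat.zero_min, Nat.sub_zero] at hblanks
          rw [hblanks, pv_mA_nonblank_cons b _ _ hh', ← pv_mA_nonblank_cons 0 _ _ hh']
        have hLHS : pvJn (pvMA 0 (l :: rest))
            = l ++ List.replicate (min b 2 + 1) '\n' ++ pvJn (pvMA 0 (h' :: t')) := by
          rw [hMAeq, pv_jn_cons _ _ (by simp [hMne]), pv_jn_blanks_append _ _ hMne]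
          simp [List.replicate_succ, List.append_assoc]
        -- RHS
        obtain ⟨c0, r0, hjr, hc0⟩ := pv_jn_head h' t' hh' (hmemr' h' (by rw [hres]; simp))
        have hRHS : pvCapNl 0 (pvJn (l :: rest))
            = l ++ List.replicate (min (b + 1) 3) '\n' ++ pvCapNl 0 (pvJn (h' :: t')) := by
          rw [pv_jn_cons _ _ hrestne, hdec, hres,
            pv_jn_blanks_append _ _ (by simp)]
          rw [show (l ++ '\n' :: (List.replicate b '\n' ++ pvJn (h' :: t')))
              = l ++ (List.replicate (b + 1) '\n' ++ pvJn (h' :: t')) by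
            simp [List.replicate_succ]]
          rw [pv_capNl_line _ _ _ hlnl hl,
            pv_capNl_ws _ _ _ (Or.inr ⟨c0, r0, hjr, hc0⟩)]
          simp [List.append_assoc]
        rw [hLHS, hRHS, hcore]
        have : min b 2 + 1 = min (b + 1) 3 := by omega
        rw [this]

lemma pv_core (K : List (List Char)) (hmem : ∀ l ∈ K, '\n' ∉ l)
    (hhead : K.head? ≠ some []) (hlast : K.getLast? ≠ some []) :
    pvJn (pvMA 0 K) = pvCapNl 0 (pvJn K) :=
  pv_core_aux K.length K le_rfl hmem hhead hlast

-- ---- assembly ----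
lemma pv_main (L : List (List Char)) (hinv : ∀ l ∈ L, '\n' ∉ l ∧ PySem.Chars.rstrip l = l) :
    PySem.Chars.strip (pvJn (pvALoop L [] 0))
      = PySem.Chars.strip (pvCapNl 0 (pvJn L)) := by
  rw [pv_loop_eq L [] 0 (fun l hl => (hinv l hl).2), List.nil_append]
  -- strip leading blanks of L
  set M := L.dropWhile List.isEmpty with hM
  set a := (L.takeWhile List.isEmpty).length with ha
  have hdecL : L = List.replicate a [] ++ M := by
    conv_lhs => rw [← List.takeWhile_append_dropWhile (p := List.isEmpty) (l := L)]
    congr 1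
    exact List.eq_replicate_of_mem (fun x hx => by
      simpa [List.isEmpty_iff] using List.mem_takeWhile_imp hx)
  have hMhead := List.head?_dropWhile_not List.isEmpty L
  rw [← hM] at hMhead
  -- strip trailing blanks of M
  set K := (M.reverse.dropWhile List.isEmpty).reverse with hK
  set c := (M.reverse.takeWhile List.isEmpty).length with hc
  have hdecM : M = K ++ List.replicate c [] := by
    have h1 : M.reverse = List.replicate c [] ++ K.reverse := by
      conv_lhs => rw [← List.takeWhile_append_dropWhile (p := List.isEmpty) (l := M.reverse)]
      rw [hK, List.reverse_reverse]
      congr 1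
      exact List.eq_replicate_of_mem (fun x hx => by
        simpa [List.isEmpty_iff] using List.mem_takeWhile_imp hx)
    have := congrArg List.reverse h1
    simpa using this
  have hKlast : K.getLast? ≠ some [] := by
    rw [hK, List.getLast?_eq_head?_reverse, List.reverse_reverse]
    have := List.head?_dropWhile_not List.isEmpty M.reverse
    cases he : (M.reverse.dropWhile List.isEmpty).head? with
    | none => simp
    | some x =>
      rw [he] at this
      intro e
      simp only [Option.some.injEq] at e
      subst e
      simp at this
  have hmemM : ∀ l ∈ M, '\n' ∉ l ∧ PySem.Chars.rstrip l = l := by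
    intro x hx
    exact hinv x ((List.dropWhile_sublist _).subset hx)
  have hmemK : ∀ l ∈ K, '\n' ∉ l := by
    intro x hx
    have : x ∈ M := by
      have h2 := (List.dropWhile_sublist (p := List.isEmpty) (l := M.reverse)).subset
      have : x ∈ M.reverse.dropWhile List.isEmpty := by
        rw [hK] at hx; simpa using hx
      simpa using h2 this
    exact (hmemM x this).1
  cases hKe : K with
  | nil =>
    -- then M is all blanks, hence (head) M = []
    have hMnil : M = [] := by
      rw [hKe] at hdecM
      simp only [List.nil_append] at hdecM
      cases hcz : c with
      | zero => rw [hdecM, hcz]; simp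
      | succ m =>
        exfalso
        rw [hdecM, hcz, List.replicate_succ] at hMhead
        simp only [List.head?_cons] at hMhead
        simp at hMhead
    rw [hdecL, hMnil, List.append_nil]
    -- both sides are strips of pure newline runs
    have h1 := pv_mA_blanks a 0 ([] : List (List Char))
    simp only [List.append_nil, Nat.zero_add, Nat.min_zero, Nat.sub_zero] at h1
    rw [h1, show pvMA a [] = [] from rfl, List.append_nil, pv_jn_blanks, pv_jn_blanks,
      pv_strip_ws]
    have h2 := pv_capNl_ws (a - 1) 0 [] (Or.inl rfl)
    simp only [List.append_nil, Nat.sub_zero] at h2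
    rw [h2, show pvCapNl 0 [] = [] from rfl, List.append_nil, pv_strip_ws]
  | cons k0 ks =>
    have hKne : K ≠ [] := by rw [hKe]; simp
    have hKhead : K.head? ≠ some [] := by
      have hMK : M.head? = K.head? := by
        rw [hdecM, List.head?_append_of_ne_nil _ hKne]
      cases he : M.head? with
      | none => rw [hMK] at he; rw [he]; simp
      | some x =>
        rw [he] at hMhead
        rw [← hMK, he]
        intro e
        simp only [Option.some.injEq] at e
        subst e
        simp at hMhead
    have hk0 : k0 ≠ [] := by
      intro e
      apply hKhead
      rw [hKe, e]
      simp
    -- A side value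
    have hMAne : pvMA 0 K ≠ [] := by
      rw [hKe, pv_mA_nonblank_cons _ _ _ hk0]
      simp
    have hA : pvMA 0 L = List.replicate (min a 2) [] ++ (pvMA 0 K ++ List.replicate (min c 2) []) := by
      rw [hdecL, hdecM]
      have h1 := pv_mA_blanks a 0 (K ++ List.replicate c [])
      simp only [Nat.zero_add, Nat.zero_min, Nat.sub_zero] at h1
      rw [h1, pv_mA_append_blanks K a c hKne hKlast]
      congr 2
      rw [hKe, pv_mA_nonblank_cons _ _ _ hk0, pv_mA_nonblank_cons _ _ _ hk0]
    have hjA : PySem.Chars.strip (pvJn (pvMA 0 L)) = PySem.Chars.strip (pvJn (pvMA 0 K)) := by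
      rw [hA, pv_jn_blanks_append _ _ (by simp [hMAne]),
        pv_jn_append_blanks _ _ hMAne, ← List.append_assoc, pv_strip_sandwich]
    -- B side value
    have hjB : PySem.Chars.strip (pvCapNl 0 (pvJn L)) = PySem.Chars.strip (pvCapNl 0 (pvJn K)) := by
      have hJL : pvJn L = List.replicate a '\n' ++ (pvJn K ++ List.replicate c '\n') := by
        rw [hdecL, hdecM, pv_jn_blanks_append _ _ (by simp [hKne]), pv_jn_append_blanks _ _ hKne]
      have hjrK : ∃ c1 r1, pvJn K = c1 :: r1 ∧ c1 ≠ '\n' := by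
        rw [hKe]
        exact pv_jn_head k0 ks hk0 (by rw [hKe] at hmemK; exact hmemK k0 (by simp))
      obtain ⟨d, hd, hdn⟩ := pv_jn_getLast K hKne hKlast hmemK
      have hcap : pvCapNl 0 (pvJn L)
          = List.replicate (min a 3) '\n' ++ (pvCapNl 0 (pvJn K) ++ List.replicate (min c 3) '\n') := by
        rw [hJL]
        rcases hjrK with ⟨c1, r1, hj1, hcn1⟩
        rw [pv_capNl_ws _ _ _ (Or.inr ⟨c1, r1 ++ List.replicate c '\n', by rw [hj1]; simp, hcn1⟩)]
        congr 1
        rw [pv_capNl_append (pvJn K) 0 _ (by rw [hj1]; simp)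
          (fun e he => by rw [hd] at he; injection he with h2; rw [← h2]; exact hdn)]
        congr 1
        have := pv_capNl_ws c 0 [] (Or.inl rfl)
        simpa [pvCapNl] using this
      rw [hcap, ← List.append_assoc, pv_strip_sandwich]
    rw [hjA, hjB]
    exact congrArg _ (pv_core K hmemK hKhead hKlast)

-- ===== VERDICT (by name: the statement is the Claim_ definition above) =====
theorem normalize_lyrics_text_py_spec : Claim_equal_normalize_lyrics_text_py := by
  intro text _
  unfold Spec_normalize_lyrics_text_py normalize_lyrics_text_py normalize_lyrics_text_py_alt
  show String.ofList (PySem.Chars.strip (pvJn (pvALoop _ [] 0)))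
      = String.ofList (PySem.Chars.strip (pvCapNl 0 (pvJn _)))
  refine congrArg String.ofList (pv_main _ ?_)
  intro l hl
  obtain ⟨p, hp, rfl⟩ := List.mem_map.mp hl
  exact ⟨fun h => pv_splitOn_no_nl _ p hp (pv_mem_rstrip h), pv_rstrip_idem p⟩
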